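-- pv_equiv track=rewrite | github.com/MAXEUR5/evidetective-artifacts | EviD_master/Utils/Gating.py | lead_uses_any_global
-- ===== SOURCE A (Python) =====
-- def lead_uses_any_global(call_chain, global_var_dict):
--     if not call_chain:
--         return False
--     func_set = set(call_chain)
--     for gname, ginfo in global_var_dict.items():
--         ref_list = ginfo.get("references") or []
--         for ref in ref_list:
--             if ref.get("function_name") in func_set:
--                 return True
--     return False
-- ===== SOURCE B (Python) =====
-- def lead_uses_any_global(call_chain, global_var_dict):
--     # sort-based: sorted dedup of both name collections, then a two-pointer
--     # merge scan detects a common element (empty chain -> empty list -> False)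
--     chain = sorted(set(call_chain))
--     refs = sorted({fn
--                    for ginfo in global_var_dict.values()
--                    for ref in (ginfo.get("references") or [])
--                    if (fn := ref.get("function_name")) is not None})
--     i = j = 0
--     while i < len(chain) and j < len(refs):
--         if chain[i] == refs[j]:
--             return True
--         if chain[i] < refs[j]:
--             i += 1
--         else:
--             j += 1
--     return False
-- ===== Notes on version B (the rewrite author's own statement) =====
-- stated objective: alternative
-- what changed: B replaces A's early-returning nested membership scan with a sort-based intersection test: it sorts the deduplicated call chain and the deduplicated referenced-function names and runs a two-pointer merge scan to detect a common element.
import Mathlib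
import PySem

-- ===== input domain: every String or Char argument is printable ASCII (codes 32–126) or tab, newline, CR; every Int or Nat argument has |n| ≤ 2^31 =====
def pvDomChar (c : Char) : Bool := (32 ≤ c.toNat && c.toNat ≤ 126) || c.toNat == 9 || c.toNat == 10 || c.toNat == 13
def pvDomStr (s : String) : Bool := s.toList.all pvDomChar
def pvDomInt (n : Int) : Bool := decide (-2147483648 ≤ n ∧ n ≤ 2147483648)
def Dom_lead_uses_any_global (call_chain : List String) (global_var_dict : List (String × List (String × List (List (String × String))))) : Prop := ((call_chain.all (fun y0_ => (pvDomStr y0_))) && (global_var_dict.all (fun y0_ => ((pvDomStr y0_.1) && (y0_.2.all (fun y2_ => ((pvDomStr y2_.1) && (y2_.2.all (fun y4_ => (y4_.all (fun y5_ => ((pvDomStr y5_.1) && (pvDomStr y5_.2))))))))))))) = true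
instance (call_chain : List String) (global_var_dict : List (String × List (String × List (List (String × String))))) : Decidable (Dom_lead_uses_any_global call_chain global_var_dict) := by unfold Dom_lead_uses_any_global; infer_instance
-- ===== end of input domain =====

-- B replaces A's early-returning nested membership scan with a sort-based intersection
-- test: sorted deduplicated name lists plus a two-pointer merge scan (objective: alternative).


-- ===== PORT A =====
-- inner 'for ref in ref_list' loop with early return; 'ref.get("function_name") in func_set'
-- (None is never in a set of strings, hence the match)
def pvOptMem (o : Option String) (fs : PySem.Set String) : Bool :=
  match o with
  | some s => PySem.Set.contains fs s
  | none => false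

def pvAInner (fs : PySem.Set String) : List (List (String × String)) → Bool
  | [] => false
  | r :: rest =>
    if pvOptMem ((PySem.Dict.mk r).get? "function_name") fs then true else pvAInner fs rest

-- outer 'for gname, ginfo in global_var_dict.items()' loop with early return;
-- 'ginfo.get("references") or []' = getD [] (value-equal: None → [] and [] → [])
def pvAOuter (fs : PySem.Set String) : List (String × List (String × List (List (String × String)))) → Bool
  | [] => false
  | (_, gi) :: rest =>
    if pvAInner fs (((PySem.Dict.mk gi).get? "references").getD []) then true else pvAOuter fs rest

def lead_uses_any_global (call_chain : List String) (global_var_dict : List (String × List (String × List (List (String × String))))) : Bool :=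
  if call_chain.isEmpty then false
  else pvAOuter (PySem.Set.ofList call_chain) global_var_dict

-- ===== PORT B =====
-- the while loop with indices i, j rendered as recursion on the two sorted lists
def pvMerge : List String → List String → Bool
  | [], _ => false
  | _ :: _, [] => false
  | x :: xs, y :: ys =>
    if x = y then true
    else if x < y then pvMerge xs (y :: ys)
    else pvMerge (x :: xs) ys
termination_by xs ys => xs.length + ys.length

-- sorted(set(call_chain)) and the sorted set comprehension of referenced names,
-- then the two-pointer merge scan
def lead_uses_any_global_alt (call_chain : List String) (global_var_dict : List (String × List (String × List (List (String × String))))) : Bool :=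
  let chain := PySem.List.sorted (PySem.Set.ofList call_chain) (fun x => x) false
  let refs := PySem.List.sorted
    (PySem.Set.ofList (global_var_dict.flatMap (fun gi =>
      (((PySem.Dict.mk gi.2).get? "references").getD []).filterMap
        (fun r => (PySem.Dict.mk r).get? "function_name"))))
    (fun x => x) false
  pvMerge chain refs

-- ===== PRECONDITION & SPEC =====
def Spec_lead_uses_any_global (call_chain : List String) (global_var_dict : List (String × List (String × List (List (String × String))))) (out : Bool) : Prop := out = lead_uses_any_global_alt call_chain global_var_dict
instance (call_chain : List String) (global_var_dict : List (String × List (String × List (List (String × String))))) (out : Bool) : Decidable (Spec_lead_uses_any_global call_chain global_var_dict out) := by unfold Spec_lead_uses_any_global; infer_instance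

-- ===== CLAIM (what is proved, stated in full; the proofs are below) =====
def Claim_equal_lead_uses_any_global : Prop := ∀ (call_chain : List String) (global_var_dict : List (String × List (String × List (List (String × String))))), Dom_lead_uses_any_global call_chain global_var_dict → Spec_lead_uses_any_global call_chain global_var_dict (lead_uses_any_global call_chain global_var_dict)

-- ===== LEMMAS AND PROOFS =====

theorem pvOptMem_eq_true_iff (o : Option String) (fs : PySem.Set String) :
    pvOptMem o fs = true ↔ ∃ s, o = some s ∧ s ∈ fs := by
  cases o with
  | none => simp [pvOptMem]
  | some s => simp [pvOptMem]

theorem pvAInner_eq_any (fs : PySem.Set String) (refs : List (List (String × String))) :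
    pvAInner fs refs = refs.any (fun r => pvOptMem ((PySem.Dict.mk r).get? "function_name") fs) := by
  induction refs with
  | nil => rfl
  | cons r rest ih =>
    simp only [pvAInner, List.any_cons, ih]
    cases pvOptMem ((PySem.Dict.mk r).get? "function_name") fs <;> simp

theorem pvAOuter_eq_any (fs : PySem.Set String) (gvd : List (String × List (String × List (List (String × String))))) :
    pvAOuter fs gvd = gvd.any (fun gi => pvAInner fs (((PySem.Dict.mk gi.2).get? "references").getD [])) := by
  induction gvd with
  | nil => rfl
  | cons g rest ih =>
    obtain ⟨gname, gi⟩ := g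
    simp only [pvAOuter, List.any_cons, ih]
    cases pvAInner fs (((PySem.Dict.mk gi).get? "references").getD []) <;> simp

-- the merge scan on strictly increasing lists detects exactly a common element
theorem pvMerge_iff : ∀ (xs ys : List String), xs.Pairwise (· < ·) → ys.Pairwise (· < ·) →
    (pvMerge xs ys = true ↔ ∃ s, s ∈ xs ∧ s ∈ ys)
  | [], ys, _, _ => by simp [pvMerge]
  | x :: xs, [], _, _ => by simp [pvMerge]
  | x :: xs, y :: ys, hx, hy => by
    rw [pvMerge]
    by_cases hxy : x = y
    · subst hxy
      rw [if_pos rfl]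
      exact iff_of_true rfl ⟨x, by simp, by simp⟩
    · simp only [if_neg hxy]
      rcases List.pairwise_cons.mp hx with ⟨hxall, hx'⟩
      rcases List.pairwise_cons.mp hy with ⟨hyall, hy'⟩
      by_cases hlt : x < y
      · rw [if_pos hlt, pvMerge_iff xs (y :: ys) hx' hy]
        constructor
        · rintro ⟨s, hs1, hs2⟩; exact ⟨s, List.mem_cons_of_mem _ hs1, hs2⟩
        · rintro ⟨s, hs1, hs2⟩
          rcases List.mem_cons.mp hs1 with h | h
          · subst h
            rcases List.mem_cons.mp hs2 with h | h
            · exact absurd h hxy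
            · exact absurd (lt_trans hlt (hyall _ h)) (lt_irrefl s)
          · exact ⟨s, h, hs2⟩
      · rw [if_neg hlt, pvMerge_iff (x :: xs) ys hx hy']
        have hyx : y < x := lt_of_le_of_ne (not_lt.mp hlt) (fun h => hxy h.symm)
        constructor
        · rintro ⟨s, hs1, hs2⟩; exact ⟨s, hs1, List.mem_cons_of_mem _ hs2⟩
        · rintro ⟨s, hs1, hs2⟩
          rcases List.mem_cons.mp hs2 with h | h
          · subst h
            rcases List.mem_cons.mp hs1 with h | h
            · exact absurd h.symm hxy
            · exact absurd (lt_trans hyx (hxall _ h)) (lt_irrefl s)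
          · exact ⟨s, hs1, h⟩
termination_by xs ys => xs.length + ys.length

-- ===== VERDICT (by name: the statement is the Claim_ definition above) =====
theorem lead_uses_any_global_spec : Claim_equal_lead_uses_any_global := by
  intro cc gvd _
  unfold Spec_lead_uses_any_global lead_uses_any_global lead_uses_any_global_alt
  have hmerge := pvMerge_iff
    (PySem.List.sorted (PySem.Set.ofList cc) (fun x => x) false)
    (PySem.List.sorted (PySem.Set.ofList (gvd.flatMap (fun gi =>
      (((PySem.Dict.mk gi.2).get? "references").getD []).filterMap
        (fun r => (PySem.Dict.mk r).get? "function_name")))) (fun x => x) false)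
    (PySem.List.sorted_ofList_pairwise_lt _)
    (PySem.List.sorted_ofList_pairwise_lt _)
  cases cc with
  | nil =>
    simp only [List.isEmpty_nil, if_true]
    rw [Bool.eq_iff_iff, hmerge]
    simp [PySem.List.mem_sorted, PySem.Set.mem_ofList]
  | cons a l =>
    simp only [List.isEmpty_cons, Bool.false_eq_true, if_false]
    rw [Bool.eq_iff_iff, hmerge]
    simp only [pvAOuter_eq_any, pvAInner_eq_any, List.any_eq_true, pvOptMem_eq_true_iff,
      PySem.Set.mem_ofList, PySem.List.mem_sorted, List.mem_flatMap, List.mem_filterMap]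
    constructor
    · rintro ⟨gi, hgi, r, hr, t, ht, htcc⟩
      exact ⟨t, htcc, gi, hgi, r, hr, ht⟩
    · rintro ⟨t, htcc, gi, hgi, r, hr, ht⟩
      exact ⟨gi, hgi, r, hr, t, ht, htcc⟩
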